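-- pv_equiv track=rewrite | github.com/alessando-guida/vcfwiper | vcf_wiper/utils.py | remove_commas_from_quoted_strings
-- ===== SOURCE A (Python) =====
-- def remove_commas_from_quoted_strings(string: str, sep: str):
--     """ Some lines might have comes or other separators between quotes. Characters
--     between quotes should be treated as part of the string and not as separators
--     having them there can interfere with the splitting and operations
--
--     Examples
--         '##INFO=<ID=DB,Number=0,Type=Flag,Description="dbSNP membership, build 129">',
--
--     the comma in the description causes problem. This function converts it into
--
--         '##INFO=<ID=DB,Number=0,Type=Flag,Description="dbSNP membership build 129">',
--     """
--     quotes = False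
--     out = ''
--
--     for char in string:
--         if char == '"':
--             if quotes:  # exiting quote
--                 quotes = False
--             else:       # entering quote
--                 quotes = True
--
--         if char == sep and quotes:
--             continue
--
--         out += char
--
--     return out
-- ===== SOURCE B (Python) =====
-- def remove_commas_from_quoted_strings(string: str, sep: str):
--     parts = string.split('"')
--     cleaned = []
--     for i, seg in enumerate(parts):
--         if i % 2 == 1:
--             seg = ''.join(c for c in seg if c != sep)
--         cleaned.append(seg)
--     return '"'.join(cleaned)
-- ===== Notes on version B (the rewrite author's own statement) =====
-- stated objective: simpler
-- what changed: Replaces the char-by-char quote-flag state machine (string concatenation per character) with a segment-level decomposition: split on '"', per-character-filter the separator out of odd-index (inside-quotes) segments, rejoin with '"' (bulk split/join instead of per-char appends).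
-- intended difference: When sep is the quote character '"' itself and the string contains a quote, A returns the string with every opening quote deleted (an artefact of toggling its flag before testing char == sep) while B returns the string unchanged, the intended behaviour since the quote delimiter itself cannot be a separator inside quotes. — e.g. on remove_commas_from_quoted_strings("a\"b\"c", "\""): A returns "ab\"c", B returns "a\"b\"c"
import Mathlib
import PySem

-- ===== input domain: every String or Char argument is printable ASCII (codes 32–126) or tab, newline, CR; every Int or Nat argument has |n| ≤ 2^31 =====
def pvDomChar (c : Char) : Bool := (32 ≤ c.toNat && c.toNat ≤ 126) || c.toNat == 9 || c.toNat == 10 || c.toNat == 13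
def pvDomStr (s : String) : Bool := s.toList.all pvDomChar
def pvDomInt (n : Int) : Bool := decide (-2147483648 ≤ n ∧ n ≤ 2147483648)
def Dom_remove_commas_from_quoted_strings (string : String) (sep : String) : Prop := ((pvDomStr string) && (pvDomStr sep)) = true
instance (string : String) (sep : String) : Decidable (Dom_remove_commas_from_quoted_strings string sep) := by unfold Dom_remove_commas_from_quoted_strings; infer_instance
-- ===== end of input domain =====

-- B replaces A's char-by-char quote-flag state machine by split-on-'"' / filter the
-- separator out of odd (inside-quotes) segments / rejoin — a simpler decomposition.

-- ===== PORT A =====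
-- literal transliteration of A: a fold carrying the (quotes, out) state of A's loop
def remove_commas_from_quoted_strings (string : String) (sep : String) : String :=
  let r := string.toList.foldl
    (fun (st : Bool × List Char) char =>
      let quotes := if char = '"' then !st.1 else st.1
      if sep.toList = [char] ∧ quotes = true then (quotes, st.2)
      else (quotes, st.2 ++ [char]))
    (false, ([] : List Char))
  String.ofList r.2

-- ===== PORT B =====
-- literal transliteration of Source B: split on '"', filter odd-index segments, rejoin
def remove_commas_from_quoted_strings_alt (string : String) (sep : String) : String :=
  let parts := PySem.Chars.splitOn string.toList ['"']
  let cleaned := (PySem.List.enumerate parts).map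
    (fun pi => if PySem.Int.mod pi.1 2 = 1 then pi.2.filter (fun c => sep.toList != [c]) else pi.2)
  String.ofList (PySem.Chars.join ['"'] cleaned)

-- ===== PRECONDITION & SPEC =====
-- When sep is the quote character '"' itself and the string contains a quote, A returns the
-- string with every opening quote deleted (an artefact of toggling its flag before testing
-- char == sep) while B returns the string unchanged, the intended behaviour since the quote
-- delimiter itself cannot be a separator inside quotes.
def D_remove_commas_from_quoted_strings (string : String) (sep : String) : Prop :=
  sep.toList = ['"'] ∧ '"' ∈ string.toList
instance (string : String) (sep : String) : Decidable (D_remove_commas_from_quoted_strings string sep) := by unfold D_remove_commas_from_quoted_strings; infer_instance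

def Spec_remove_commas_from_quoted_strings (string : String) (sep : String) (out : String) : Prop := ¬ D_remove_commas_from_quoted_strings string sep → out = remove_commas_from_quoted_strings_alt string sep
instance (string : String) (sep : String) (out : String) : Decidable (Spec_remove_commas_from_quoted_strings string sep out) := by unfold Spec_remove_commas_from_quoted_strings; infer_instance

def pvDiffWitness_remove_commas_from_quoted_strings : String × String := ("a\"b\"c", "\"")
def pvDiffWitnessOut_remove_commas_from_quoted_strings : String × String := ("ab\"c", "a\"b\"c")

-- ===== CLAIM (what is proved, stated in full; the proofs are below) =====
def Claim_unchanged_remove_commas_from_quoted_strings : Prop := ∀ (string : String) (sep : String), Dom_remove_commas_from_quoted_strings string sep → Spec_remove_commas_from_quoted_strings string sep (remove_commas_from_quoted_strings string sep)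
def Claim_changed_remove_commas_from_quoted_strings : Prop := Dom_remove_commas_from_quoted_strings (pvDiffWitness_remove_commas_from_quoted_strings.1) (pvDiffWitness_remove_commas_from_quoted_strings.2) ∧ D_remove_commas_from_quoted_strings (pvDiffWitness_remove_commas_from_quoted_strings.1) (pvDiffWitness_remove_commas_from_quoted_strings.2) ∧ remove_commas_from_quoted_strings (pvDiffWitness_remove_commas_from_quoted_strings.1) (pvDiffWitness_remove_commas_from_quoted_strings.2) = pvDiffWitnessOut_remove_commas_from_quoted_strings.1 ∧ remove_commas_from_quoted_strings_alt (pvDiffWitness_remove_commas_from_quoted_strings.1) (pvDiffWitness_remove_commas_from_quoted_strings.2) = pvDiffWitnessOut_remove_commas_from_quoted_strings.2 ∧ pvDiffWitnessOut_remove_commas_from_quoted_strings.1 ≠ pvDiffWitnessOut_remove_commas_from_quoted_strings.2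
def Claim_exact_remove_commas_from_quoted_strings : Prop := ∀ (string : String) (sep : String), Dom_remove_commas_from_quoted_strings string sep → D_remove_commas_from_quoted_strings string sep → remove_commas_from_quoted_strings string sep ≠ remove_commas_from_quoted_strings_alt string sep

-- ===== LEMMAS AND PROOFS =====

-- characterisation of A's loop: state machine as a simple recursion
def gQ (sepL : List Char) : Bool → List Char → List Char
  | _, [] => []
  | q, c :: l =>
    let q' := if c = '"' then !q else q
    if sepL = [c] ∧ q' = true then gQ sepL q' l else c :: gQ sepL q' l

-- characterisation of B's rejoin: alternate kept / filtered segments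
def joinAlt (sepL : List Char) : Bool → List (List Char) → List Char
  | _, [] => []
  | q, p :: ps =>
    (if q then p.filter (fun c => sepL != [c]) else p) ++
      (match ps with
       | [] => []
       | _ :: _ => '"' :: joinAlt sepL (!q) ps)

lemma joinAlt_cons₂ (sepL : List Char) (q : Bool) (p p2 : List Char) (ps : List (List Char)) :
    joinAlt sepL q (p :: p2 :: ps)
      = (if q then p.filter (fun c => sepL != [c]) else p) ++ '"' :: joinAlt sepL (!q) (p2 :: ps) := rfl

lemma foldA (sep : String) (l : List Char) : ∀ (q : Bool) (acc : List Char),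
    (List.foldl
      (fun (st : Bool × List Char) char =>
        let quotes := if char = '"' then !st.1 else st.1
        if sep.toList = [char] ∧ quotes = true then (quotes, st.2)
        else (quotes, st.2 ++ [char]))
      (q, acc) l).2 = acc ++ gQ sep.toList q l := by
  induction l with
  | nil => intro q acc; simp [gQ]
  | cons c l ih =>
    intro q acc
    rw [List.foldl_cons]
    have hinit : (let quotes := if c = '"' then !(q, acc).1 else (q, acc).1
        if sep.toList = [c] ∧ quotes = true then (quotes, (q, acc).2)
        else (quotes, (q, acc).2 ++ [c]))
        = if sep.toList = [c] ∧ (if c = '"' then !q else q) = true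
          then ((if c = '"' then !q else q), acc)
          else ((if c = '"' then !q else q), acc ++ [c]) := rfl
    rw [hinit]
    by_cases h : sep.toList = [c] ∧ (if c = '"' then !q else q) = true
    · rw [if_pos h, ih]
      conv_rhs => simp only [gQ]
      rw [if_pos h]
    · rw [if_neg h, ih]
      conv_rhs => simp only [gQ]
      rw [if_neg h]
      simp

lemma go_eq (fuel : Nat) : ∀ (l cur : List Char) (acc : List (List Char)), l.length ≤ fuel →
    PySem.Chars.splitOn.go ['"'] fuel l cur acc
      = acc.reverse ++ List.modifyHead (fun t => cur.reverse ++ t) (List.splitOnP (fun x => x == '"') l) := by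
  induction fuel with
  | zero =>
    intro l cur acc h
    have hl : l = [] := List.eq_nil_of_length_eq_zero (Nat.le_zero.mp h)
    subst hl
    rw [PySem.Chars.splitOn.go]
    simp [List.splitOnP_nil]
  | succ fuel ih =>
    intro l cur acc h
    cases l with
    | nil =>
      rw [PySem.Chars.splitOn.go]
      simp [List.splitOnP_nil]
      omega
    | cons c rest =>
      rw [PySem.Chars.splitOn.go]
      by_cases hc : c = '"'
      · subst hc
        rw [if_pos (by simp [List.isPrefixOf])]
        have hd : List.drop ['"'].length ('"' :: rest) = rest := by simp
        have hr : rest.length ≤ fuel := by simp at h; omega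
        rw [hd, ih rest [] _ hr]
        rcases hs : List.splitOnP (fun x => x == '"') rest with _ | ⟨p, ps⟩
        · exact absurd hs (List.splitOnP_ne_nil _ _)
        · simp [List.splitOnP_cons, hs]
      · rw [if_neg (by simp [List.isPrefixOf]; intro e; exact absurd e.symm hc)]
        rw [ih rest (c :: cur) acc (by simpa using Nat.le_of_succ_le_succ h)]
        rw [List.splitOnP_cons, if_neg (by simp [hc])]
        rcases hs : List.splitOnP (fun x => x == '"') rest with _ | ⟨p, ps⟩
        · exact absurd hs (List.splitOnP_ne_nil _ _)
        · simp

lemma splitOn_eq (cs : List Char) :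
    PySem.Chars.splitOn cs ['"'] = List.splitOnP (fun x => x == '"') cs := by
  unfold PySem.Chars.splitOn
  rw [go_eq (cs.length + 1) cs [] [] (by omega)]
  rcases hs : List.splitOnP (fun x => x == '"') cs with _ | ⟨p, ps⟩
  · exact absurd hs (List.splitOnP_ne_nil _ _)
  · simp

lemma join_cons' (x : List Char) (zs : List (List Char)) (h : zs ≠ []) :
    PySem.Chars.join ['"'] (x :: zs) = x ++ '"' :: PySem.Chars.join ['"'] zs := by
  cases zs with
  | nil => exact absurd rfl h
  | cons y zs => simp [PySem.Chars.join, List.intercalate, List.intersperse_cons₂]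

lemma parity_succ (n : Int) : (decide ((n + 1) % 2 = 1)) = !(decide (n % 2 = 1)) := by
  by_cases h : n % 2 = 1 <;> simp [h] <;> omega

lemma join_enum (sepL : List Char) (ps : List (List Char)) : ∀ (n : Int),
    PySem.Chars.join ['"']
        ((PySem.List.enumerate ps n).map
          (fun pi => if PySem.Int.mod pi.1 2 = 1 then pi.2.filter (fun c => sepL != [c]) else pi.2))
      = joinAlt sepL (decide (n % 2 = 1)) ps := by
  induction ps with
  | nil => intro n; simp [PySem.List.enumerate, PySem.Chars.join, List.intercalate, joinAlt]
  | cons p ps ih =>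
    intro n
    have hmod : PySem.Int.mod n 2 = n % 2 := by
      rw [PySem.Int.mod_eq_emod_of_pos] <;> norm_num
    cases ps with
    | nil =>
      simp only [PySem.List.enumerate, List.map_cons, List.map_nil]
      by_cases h : n % 2 = 1 <;>
        simp [PySem.Chars.join, List.intercalate, joinAlt, hmod, h]
    | cons p2 ps2 =>
      have he : PySem.List.enumerate (p :: p2 :: ps2) n
          = (n, p) :: PySem.List.enumerate (p2 :: ps2) (n + 1) := by
        simp [PySem.List.enumerate]
      rw [he, List.map_cons]
      rw [join_cons' _ _ (by simp [PySem.List.enumerate])]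
      rw [ih (n + 1), parity_succ n, joinAlt_cons₂]
      by_cases h : n % 2 = 1 <;> simp [hmod, h]

lemma joinAlt_eq_g (sepL : List Char) (h : sepL ≠ ['"']) (cs : List Char) : ∀ (q : Bool),
    joinAlt sepL q (List.splitOnP (fun x => x == '"') cs) = gQ sepL q cs := by
  induction cs with
  | nil => intro q; simp [List.splitOnP_nil, joinAlt, gQ]
  | cons c cs ih =>
    intro q
    rw [List.splitOnP_cons]
    obtain ⟨p, ps, hps⟩ := List.exists_cons_of_ne_nil (List.splitOnP_ne_nil (fun x => x == '"') cs)
    by_cases hc : c = '"'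
    · subst hc
      rw [if_pos (by simp)]
      rw [hps]
      have hih := ih (!q); rw [hps] at hih
      simp only [joinAlt_cons₂]
      simp [gQ, h, hih]
    · rw [if_neg (by simp [hc])]
      rw [hps, List.modifyHead_cons]
      have hih := ih q; rw [hps] at hih
      cases q with
      | false =>
        have hgq : gQ sepL false (c :: cs) = c :: gQ sepL false cs := by simp [gQ, hc]
        rw [hgq, ← hih]
        simp [joinAlt]
      | true =>
        by_cases hsep : sepL = [c]
        · have hgq : gQ sepL true (c :: cs) = gQ sepL true cs := by simp [gQ, hc, hsep]
          rw [hgq, ← hih]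
          have hk : ((sepL != [c]) : Bool) = false := by simp [hsep]
          simp [joinAlt, hk]
        · have hgq : gQ sepL true (c :: cs) = c :: gQ sepL true cs := by simp [gQ, hc, hsep]
          rw [hgq, ← hih]
          have hk : ((sepL != [c]) : Bool) = true := by simp [hsep]
          simp [joinAlt, hk]

lemma A_char (string sep : String) :
    remove_commas_from_quoted_strings string sep
      = String.ofList (gQ sep.toList false string.toList) := by
  have h := foldA sep string.toList false []
  simp only [List.nil_append] at h
  unfold remove_commas_from_quoted_strings
  exact congrArg String.ofList h

lemma B_char (string sep : String) :
    remove_commas_from_quoted_strings_alt string sep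
      = String.ofList (joinAlt sep.toList false (List.splitOnP (fun x => x == '"') string.toList)) := by
  unfold remove_commas_from_quoted_strings_alt
  simp only [splitOn_eq, join_enum]
  norm_num

lemma splitOnP_no (cs : List Char) (h : '"' ∉ cs) :
    List.splitOnP (fun x => x == '"') cs = [cs] := by
  induction cs with
  | nil => simp [List.splitOnP_nil]
  | cons c cs ih =>
    simp only [List.mem_cons, not_or] at h
    rw [List.splitOnP_cons, if_neg (by simp; intro e; exact h.1 e.symm)]
    rw [ih h.2, List.modifyHead_cons]

lemma gQ_no (sepL cs : List Char) (h : '"' ∉ cs) : gQ sepL false cs = cs := by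
  induction cs with
  | nil => simp [gQ]
  | cons c cs ih =>
    simp only [List.mem_cons, not_or] at h
    have hc : c ≠ '"' := fun e => h.1 e.symm
    simp [gQ, hc, ih h.2]

lemma joinAlt_split_id (cs : List Char) : ∀ (q : Bool),
    joinAlt ['"'] q (List.splitOnP (fun x => x == '"') cs) = cs := by
  induction cs with
  | nil => intro q; simp [List.splitOnP_nil, joinAlt]
  | cons c cs ih =>
    intro q
    rw [List.splitOnP_cons]
    obtain ⟨p, ps, hps⟩ := List.exists_cons_of_ne_nil (List.splitOnP_ne_nil (fun x => x == '"') cs)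
    by_cases hc : c = '"'
    · subst hc
      rw [if_pos (by simp)]
      rw [hps]
      have hih := ih (!q); rw [hps] at hih
      simp only [joinAlt_cons₂]
      simp [hih]
    · rw [if_neg (by simp [hc])]
      rw [hps, List.modifyHead_cons]
      have hih := ih q; rw [hps] at hih
      have hk : ((['"'] != [c]) : Bool) = true := by simp; intro e; exact absurd e.symm hc
      by_cases hq : q <;> simp [joinAlt, hq, hk, ← hih]

lemma gQ_len_le (sepL cs : List Char) : ∀ (q : Bool), (gQ sepL q cs).length ≤ cs.length := by
  induction cs with
  | nil => intro q; simp [gQ]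
  | cons c cs ih =>
    intro q
    by_cases h : sepL = [c] ∧ (if c = '"' then !q else q) = true
    · simp only [gQ]
      rw [if_pos h]
      exact (ih _).trans (by simp)
    · simp only [gQ]
      rw [if_neg h]
      simpa using ih _

lemma gQ_len_lt (cs : List Char) (h : '"' ∈ cs) : (gQ ['"'] false cs).length < cs.length := by
  induction cs with
  | nil => cases h
  | cons c cs ih =>
    by_cases hc : c = '"'
    · subst hc
      have he : gQ ['"'] false ('"' :: cs) = gQ ['"'] true cs := by simp [gQ]
      rw [he]
      have := gQ_len_le ['"'] cs true
      simp only [List.length_cons]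
      omega
    · have h' : '"' ∈ cs := by
        rcases List.mem_cons.mp h with e | e
        · exact absurd e.symm hc
        · exact e
      have he : gQ ['"'] false (c :: cs) = c :: gQ ['"'] false cs := by simp [gQ, hc]
      rw [he]
      simpa using ih h'

-- ===== VERDICT (by name: the statement is the Claim_ definition above) =====
theorem remove_commas_from_quoted_strings_spec : Claim_unchanged_remove_commas_from_quoted_strings := by
  intro string sep _hdom
  unfold Spec_remove_commas_from_quoted_strings
  intro hnD
  unfold D_remove_commas_from_quoted_strings at hnD
  rw [A_char, B_char]
  by_cases hsep : sep.toList = ['"']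
  · have hq : '"' ∉ string.toList := fun hm => hnD ⟨hsep, hm⟩
    rw [hsep, splitOnP_no _ hq, gQ_no _ _ hq]
    simp [joinAlt]
  · rw [joinAlt_eq_g sep.toList hsep]

theorem remove_commas_from_quoted_strings_changed : Claim_changed_remove_commas_from_quoted_strings := by
  unfold Claim_changed_remove_commas_from_quoted_strings; decide

theorem remove_commas_from_quoted_strings_tight : Claim_exact_remove_commas_from_quoted_strings := by
  intro string sep _hdom hD
  unfold D_remove_commas_from_quoted_strings at hD
  obtain ⟨h1, h2⟩ := hD
  rw [A_char, B_char]
  intro he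
  have ht := congrArg String.toList he
  rw [String.toList_ofList, String.toList_ofList] at ht
  rw [h1, joinAlt_split_id] at ht
  have hlt := gQ_len_lt string.toList h2
  rw [ht] at hlt
  exact lt_irrefl _ hlt
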